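-- pv_equiv track=rewrite | github.com/charSLee013/CognitiveKernel-Launchpad | ck_pro/agents/model.py | truncate_message_list
-- ===== SOURCE A (Python) =====
-- def truncate_message_list(messages, max_length):
--     # Very simple char-based truncation as a fallback
--     total = 0
--     out = []
--     for msg in reversed(messages):
--         content = msg.get("content", "")
--         size = len(str(content))
--         if total + size > max_length:
--             if not out:
--                 # truncate this one
--                 truncated_msg = msg.copy()
--                 text = str(content)
--                 truncated_msg["content"] = text[: max(0, max_length - total)]
--                 out.insert(0, truncated_msg)
--             break
--         out.insert(0, msg)
--         total += size
--     return out
-- ===== SOURCE B (Python) =====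
-- def truncate_message_list(messages, max_length):
--     # Precompute sizes; special-case truncation of the last message; return a slice.
--     if not messages:
--         return []
--     sizes = [len(str(m.get("content", ""))) for m in messages]
--     if sizes[-1] > max_length:
--         truncated = messages[-1].copy()
--         truncated["content"] = str(messages[-1].get("content", ""))[: max(0, max_length)]
--         return [truncated]
--     total = 0
--     keep = 0
--     for size in reversed(sizes):
--         if total + size > max_length:
--             break
--         total += size
--         keep += 1
--     return messages[len(messages) - keep:]
-- ===== Notes on version B (the rewrite author's own statement) =====
-- stated objective: simpler
-- what changed: B precomputes the content sizes, handles the only possible truncation (of the last message) as an up-front special case, and returns the kept suffix as a single slice messages[len-keep:], instead of A's one reversed loop that conditionally truncates inside and builds the output via insert(0, ...).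
import Mathlib
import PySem

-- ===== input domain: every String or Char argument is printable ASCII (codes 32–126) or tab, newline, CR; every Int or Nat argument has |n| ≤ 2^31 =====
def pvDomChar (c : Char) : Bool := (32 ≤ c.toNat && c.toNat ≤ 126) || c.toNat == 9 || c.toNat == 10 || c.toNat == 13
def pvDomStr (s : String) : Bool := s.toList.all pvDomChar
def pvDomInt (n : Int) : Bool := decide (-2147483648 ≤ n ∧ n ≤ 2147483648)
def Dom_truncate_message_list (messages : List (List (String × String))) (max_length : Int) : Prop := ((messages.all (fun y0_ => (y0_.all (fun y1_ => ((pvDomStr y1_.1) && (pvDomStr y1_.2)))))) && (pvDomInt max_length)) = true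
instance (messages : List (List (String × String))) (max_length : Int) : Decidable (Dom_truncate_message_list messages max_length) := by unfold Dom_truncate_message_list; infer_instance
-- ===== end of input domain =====

-- B computes the same result by a different decomposition: the truncation of the last message is
-- an up-front special case and the kept suffix is returned as a slice, instead of A's single
-- reversed loop building the output via insert(0, …).

-- ===== PORT A =====
-- body of A's 'for msg in reversed(messages)' loop, with early exit on break
def pvAloop (ml : Int) : List (List (String × String)) → Int → List (List (String × String)) → List (List (String × String))
  | [], _, out => out
  | msg :: rest, total, out =>
      let content := (PySem.Dict.mk msg).getD "content" ""
      let size : Int := PySem.Str.len content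
      if total + size > ml then
        if out.isEmpty then
          ((PySem.Dict.mk msg).insert "content"
            (PySem.Str.slice content none (some (max 0 (ml - total))))).items :: out
        else out
      else pvAloop ml rest (total + size) (msg :: out)

def truncate_message_list (messages : List (List (String × String))) (max_length : Int) : List (List (String × String)) :=
  pvAloop max_length messages.reverse 0 []

-- ===== PORT B =====
-- B's 'for size in reversed(sizes)' loop: accumulate total, count how many messages fit
def pvBkeep (ml : Int) : List Int → Int → Int → Int
  | [], _, keep => keep
  | s :: rest, total, keep =>
      if total + s > ml then keep else pvBkeep ml rest (total + s) (keep + 1)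

def truncate_message_list_alt (messages : List (List (String × String))) (max_length : Int) : List (List (String × String)) :=
  if messages.isEmpty then []
  else
    let sizes : List Int := messages.map (fun m => PySem.Str.len ((PySem.Dict.mk m).getD "content" ""))
    -- sizes[-1] / messages[-1]: in range because messages is nonempty here
    if PySem.List.pyGetD sizes (-1) 0 > max_length then
      let m := PySem.List.pyGetD messages (-1) []
      [((PySem.Dict.mk m).insert "content"
          (PySem.Str.slice ((PySem.Dict.mk m).getD "content" "") none (some (max 0 max_length)))).items]
    else
      let keep := pvBkeep max_length sizes.reverse 0 0
      PySem.List.slice messages (some ((messages.length : Int) - keep)) none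

-- ===== PRECONDITION & SPEC =====
def Spec_truncate_message_list (messages : List (List (String × String))) (max_length : Int) (out : List (List (String × String))) : Prop := out = truncate_message_list_alt messages max_length
instance (messages : List (List (String × String))) (max_length : Int) (out : List (List (String × String))) : Decidable (Spec_truncate_message_list messages max_length out) := by unfold Spec_truncate_message_list; infer_instance

-- ===== CLAIM (what is proved, stated in full; the proofs are below) =====
def Claim_equal_truncate_message_list : Prop := ∀ (messages : List (List (String × String))) (max_length : Int), Dom_truncate_message_list messages max_length → Spec_truncate_message_list messages max_length (truncate_message_list messages max_length)

-- ===== LEMMAS AND PROOFS =====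

-- size of one message, as both programs compute it
def pvSize (m : List (String × String)) : Int :=
  PySem.Str.len ((PySem.Dict.mk m).getD "content" "")

-- how many leading elements of l (a reversed message list) the greedy scan keeps
def pvCount (ml : Int) : List (List (String × String)) → Int → Nat
  | [], _ => 0
  | msg :: rest, total =>
      if total + pvSize msg > ml then 0 else pvCount ml rest (total + pvSize msg) + 1

theorem pvCount_le (ml : Int) (l : List (List (String × String))) (total : Int) :
    pvCount ml l total ≤ l.length := by
  induction l generalizing total with
  | nil => simp [pvCount]
  | cons m rest ih =>
      simp only [pvCount, List.length_cons]
      split_ifs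
      · omega
      · exact Nat.succ_le_succ (ih _)

theorem pvAloop_eq (ml : Int) (l : List (List (String × String))) (total : Int)
    (out : List (List (String × String))) (h : out ≠ []) :
    pvAloop ml l total out = (l.take (pvCount ml l total)).reverse ++ out := by
  induction l generalizing total out with
  | nil => simp [pvAloop, pvCount]
  | cons m rest ih =>
      obtain ⟨o, os, rfl⟩ : ∃ o os, out = o :: os := by
        cases out with
        | nil => exact absurd rfl h
        | cons o os => exact ⟨o, os, rfl⟩
      simp only [pvAloop, pvCount, pvSize, List.isEmpty_cons, Bool.false_eq_true, if_false]
      split_ifs with hgt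
      · simp
      · rw [ih _ _ (by simp)]
        simp [List.append_assoc]

theorem pvBkeep_eq (ml : Int) (l : List (List (String × String))) (total k : Int) :
    pvBkeep ml (l.map pvSize) total k = k + (pvCount ml l total : Int) := by
  induction l generalizing total k with
  | nil => simp [pvBkeep, pvCount]
  | cons m rest ih =>
      simp only [List.map_cons, pvBkeep, pvCount]
      split_ifs with hgt
      · simp
      · rw [ih]
        push_cast
        ring

-- ===== VERDICT (by name: the statement is the Claim_ definition above) =====
theorem truncate_message_list_spec : Claim_equal_truncate_message_list := by
  intro messages ml _
  unfold Spec_truncate_message_list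
  cases hrev : messages.reverse with
  | nil =>
      have hmsg : messages = [] := by simpa using congrArg List.reverse hrev
      subst hmsg
      simp [truncate_message_list, truncate_message_list_alt, pvAloop]
  | cons m L =>
      have hmsg : messages = L.reverse ++ [m] := by
        have := congrArg List.reverse hrev
        simpa using this
      subst hmsg
      have hA : truncate_message_list (L.reverse ++ [m]) ml = pvAloop ml (m :: L) 0 [] := by
        simp only [truncate_message_list]
        rw [hrev]
      rw [hA]
      by_cases hgt : 0 + pvSize m > ml
      · -- last message alone already exceeds the budget
        have hA1 : pvAloop ml (m :: L) 0 []
            = [((PySem.Dict.mk m).insert "content"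
                (PySem.Str.slice ((PySem.Dict.mk m).getD "content" "") none (some (max 0 (ml - 0))))).items] := by
          simp only [pvAloop]
          rw [if_pos (by simpa [pvSize] using hgt)]
          simp
        rw [hA1]
        simp only [truncate_message_list_alt]
        rw [if_neg (by simp)]
        simp only [List.map_append, List.map_cons, List.map_nil]
        rw [if_pos (by simpa [PySem.List.pyGetD_neg_one_append_singleton, pvSize] using hgt)]
        simp [PySem.List.pyGetD_neg_one_append_singleton]
      · -- last message fits: both keep the longest suffix that fits
        have hA1 : pvAloop ml (m :: L) 0 []
            = (L.take (pvCount ml L (0 + pvSize m))).reverse ++ [m] := by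
          simp only [pvAloop]
          rw [if_neg (by simpa [pvSize] using hgt)]
          exact pvAloop_eq ml L (0 + pvSize m) [m] (by simp)
        rw [hA1]
        simp only [truncate_message_list_alt]
        rw [if_neg (by simp)]
        simp only [List.map_append, List.map_cons, List.map_nil]
        rw [if_neg (by simpa [PySem.List.pyGetD_neg_one_append_singleton, pvSize] using hgt)]
        have hrevmap : ((L.reverse.map (fun m => PySem.Str.len ((PySem.Dict.mk m).getD "content" ""))) ++ [PySem.Str.len ((PySem.Dict.mk m).getD "content" "")]).reverse = (m :: L).map pvSize := by
          simp [List.map_reverse, pvSize]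
        rw [hrevmap]
        have hkeep : pvBkeep ml ((m :: L).map pvSize) 0 0
            = 1 + (pvCount ml L (0 + pvSize m) : Int) := by
          simp only [List.map_cons, pvBkeep]
          rw [if_neg (by simpa using hgt)]
          rw [pvBkeep_eq]
          ring
        rw [hkeep]
        have hcle : pvCount ml L (0 + pvSize m) ≤ L.length := pvCount_le _ _ _
        set c := pvCount ml L (0 + pvSize m) with hc
        have hlen : ((L.reverse ++ [m]).length : Int) - (1 + (c : Int)) = ((L.length - c : Nat) : Int) := by
          simp only [List.length_append, List.length_reverse, List.length_cons, List.length_nil]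
          push_cast [Nat.cast_sub hcle]
          ring
        rw [hlen, PySem.List.slice_from_natCast]
        rw [List.drop_append_of_le_length (by simp)]
        congr 1
        rw [List.reverse_take]
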